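-- pv_equiv track=rewrite | github.com/yutao-li/leetcode | two sigma/non overlap.py | solution
-- ===== SOURCE A (Python) =====
-- def solution(segments: [int]) -> int:
--     start_order = sorted(i for i, _ in segments)
--     end_order = sorted(i for _, i in segments)
--     start = 1
--     res = 0
--     n = len(segments)
--     for i in end_order:
--         while start < n and start_order[start] < i:
--             start += 1
--         if start == n:
--             break
--         res += n - start
--     return res
-- ===== SOURCE B (Python) =====
-- def solution(segments: [int]) -> int:
--     # The overall smallest start is never counted as a partner; for every
--     # segment's end, count the remaining starts that lie at or after it.
--     if not segments:
--         return 0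
--     counted = [s for s, _ in segments]
--     counted.remove(min(counted))
--     return sum(sum(1 for s in counted if s >= e) for _, e in segments)
-- ===== Notes on version B (the rewrite author's own statement) =====
-- stated objective: simpler
-- what changed: Replaces A's two sorted arrays with a persistent two-pointer sweep and break by a direct unsorted count: remove one occurrence of the smallest start, then for each segment's end count the remaining starts at or after it.
import Mathlib
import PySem

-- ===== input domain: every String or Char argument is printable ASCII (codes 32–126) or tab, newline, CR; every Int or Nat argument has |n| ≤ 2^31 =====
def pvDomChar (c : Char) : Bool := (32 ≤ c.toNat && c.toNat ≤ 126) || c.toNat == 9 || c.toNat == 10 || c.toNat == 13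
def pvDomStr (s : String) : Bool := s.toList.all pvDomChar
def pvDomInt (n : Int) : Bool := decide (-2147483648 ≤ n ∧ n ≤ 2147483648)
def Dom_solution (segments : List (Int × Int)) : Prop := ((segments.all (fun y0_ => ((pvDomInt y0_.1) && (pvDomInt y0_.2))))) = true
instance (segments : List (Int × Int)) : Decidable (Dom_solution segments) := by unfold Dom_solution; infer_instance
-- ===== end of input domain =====

-- B drops A's two sorted arrays + two-pointer sweep for a direct unsorted count
-- (remove one smallest start, then count per end); simpler, same values.

-- ===== PORT A =====
-- while start < n and start_order[start] < i: start += 1   (fuel = len(start_order))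
def pvAdvance (so : List Int) (n i : Int) : Nat → Int → Int
  | 0, start => start
  | fuel + 1, start =>
    if start < n ∧ PySem.List.pyGetD so start 0 < i then
      pvAdvance so n i fuel (start + 1)
    else start

-- the 'for i in end_order' loop with its break
def pvLoopA (so : List Int) (n : Int) : List Int → Int → Int → Int
  | [], _, res => res
  | i :: rest, start, res =>
    let start' := pvAdvance so n i so.length start
    if start' = n then res
    else pvLoopA so n rest start' (res + (n - start'))

def solution (segments : List (Int × Int)) : Int :=
  let start_order := PySem.List.sorted (segments.map (fun p => p.1)) (fun x => x) false
  let end_order := PySem.List.sorted (segments.map (fun p => p.2)) (fun x => x) false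
  let n : Int := segments.length
  pvLoopA start_order n end_order 1 0

-- ===== PORT B =====
def solution_alt (segments : List (Int × Int)) : Int :=
  if segments = [] then 0
  else
    let starts := segments.map (fun p => p.1)
    let m := (PySem.List.min? starts (fun x => x)).getD 0          -- min(counted); list nonempty
    let counted := (PySem.List.remove? starts m).getD []           -- counted.remove(min(counted))
    (segments.map (fun p => ((counted.countP (fun s => decide (p.2 ≤ s)) : Nat) : Int))).sum

-- ===== PRECONDITION & SPEC =====
def Spec_solution (segments : List (Int × Int)) (out : Int) : Prop := out = solution_alt segments
instance (segments : List (Int × Int)) (out : Int) : Decidable (Spec_solution segments out) := by unfold Spec_solution; infer_instance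

-- ===== CLAIM (what is proved, stated in full; the proofs are below) =====
def Claim_equal_solution : Prop := ∀ (segments : List (Int × Int)), Dom_solution segments → Spec_solution segments (solution segments)

-- ===== LEMMAS AND PROOFS =====

-- number of elements of S strictly below e, as an Int
def pvCnt (S : List Int) (e : Int) : Int := (S.countP (fun s => decide (s < e)) : Nat)

theorem pvCnt_nonneg (S : List Int) (e : Int) : 0 ≤ pvCnt S e := by
  simp [pvCnt]

theorem pvCnt_le_length (S : List Int) (e : Int) : pvCnt S e ≤ (S.length : Int) := by
  simp [pvCnt]
  exact_mod_cast S.countP_le_length (p := fun s => decide (s < e))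

theorem pvCnt_mono (S : List Int) {e e' : Int} (h : e ≤ e') : pvCnt S e ≤ pvCnt S e' := by
  simp only [pvCnt, Nat.cast_le]
  exact List.countP_mono_left (fun x _ hx => by
    simp only [decide_eq_true_eq] at *; omega)

-- in a sorted list, S[j] < e ↔ j < #(elements < e)
theorem pvIdx_lt_iff (S : List Int) (hS : S.Pairwise (· ≤ ·)) (e : Int) :
    ∀ j : Nat, (hj : j < S.length) → (S[j] < e ↔ (j : Int) < pvCnt S e) := by
  induction S with
  | nil => intro j hj; simp at hj
  | cons x t ih =>
    rcases List.pairwise_cons.mp hS with ⟨hx, ht⟩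
    intro j hj
    cases j with
    | zero =>
      simp only [List.getElem_cons_zero, pvCnt, List.countP_cons]
      constructor
      · intro h
        simp only [h, decide_true, if_true]
        push_cast
        omega
      · intro h; by_contra hc
        have hxe : ¬ x < e := hc
        have ht0 : t.countP (fun s => decide (s < e)) = 0 := by
          apply List.countP_eq_zero.mpr
          intro a ha
          simp only [decide_eq_true_eq]
          have := hx a ha; omega
        rw [ht0] at h
        simp [hxe] at h
    | succ k =>
      have hk : k < t.length := by simpa using hj
      have iht := ih ht k hk
      simp only [List.getElem_cons_succ]
      have hc : pvCnt (x :: t) e =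
          pvCnt t e + (if x < e then 1 else 0) := by
        unfold pvCnt
        rw [List.countP_cons]
        by_cases h : x < e
        · simp [h]
        · simp [h]
      constructor
      · intro h
        have hxlt : x < e := lt_of_le_of_lt (hx _ (t.getElem_mem hk)) h
        rw [hc, if_pos hxlt]
        have := iht.mp h
        push_cast
        omega
      · intro h
        apply iht.mpr
        rw [hc] at h
        split_ifs at h with hx' <;> push_cast at h ⊢ <;> omega

theorem pvAdvance_eq (S : List Int) (e : Int) (hS : S.Pairwise (· ≤ ·)) :
    ∀ (fuel : Nat) (start : Int), 0 ≤ start → (S.length : Int) ≤ fuel + start →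
      pvAdvance S (S.length : Int) e fuel start = max start (pvCnt S e) := by
  intro fuel
  induction fuel with
  | zero =>
    intro start h0 hf
    simp only [Nat.cast_zero, zero_add] at hf
    have := pvCnt_le_length S e
    simp only [pvAdvance]
    omega
  | succ f ih =>
    intro start h0 hf
    simp only [pvAdvance]
    by_cases hlt : start < (S.length : Int)
    · have hjr : start.toNat < S.length := by omega
      have hget : PySem.List.pyGetD S start 0 = S[start.toNat] := by
        apply PySem.List.pyGetD_eq_getElem <;> omega
      have hiff := pvIdx_lt_iff S hS e start.toNat hjr
      by_cases hv : S[start.toNat] < e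
      · have hscnt : start < pvCnt S e := by
          have := hiff.mp hv; omega
        rw [if_pos ⟨hlt, by rw [hget]; exact hv⟩]
        rw [ih (start + 1) (by omega) (by push_cast at hf ⊢; omega)]
        omega
      · have hscnt : ¬ start < pvCnt S e := by
          intro hc
          exact hv (hiff.mpr (by omega))
        rw [if_neg (by rw [hget]; tauto)]
        omega
    · rw [if_neg (by tauto)]
      have := pvCnt_le_length S e
      omega

theorem pvLoopA_eq (S : List Int) (hS : S.Pairwise (· ≤ ·)) :
    ∀ (E : List Int) (start res : Int), E.Pairwise (· ≤ ·) →
      0 ≤ start → start ≤ (S.length : Int) →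
      pvLoopA S (S.length : Int) E start res =
        res + (E.map (fun e => (S.length : Int) - max start (pvCnt S e))).sum := by
  intro E
  induction E with
  | nil => intro start res _ _ _; simp [pvLoopA]
  | cons i rest ih =>
    intro start res hE h0 hn
    rcases List.pairwise_cons.mp hE with ⟨hi, hrest⟩
    have hadv : pvAdvance S (S.length : Int) i S.length start = max start (pvCnt S i) :=
      pvAdvance_eq S i hS S.length start h0 (by omega)
    have hcle := pvCnt_le_length S i
    have hc0 := pvCnt_nonneg S i
    simp only [pvLoopA, hadv]
    by_cases hbr : max start (pvCnt S i) = (S.length : Int)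
    · rw [if_pos hbr]
      have hzero : ∀ x ∈ (rest.map (fun e => (S.length : Int) - max start (pvCnt S e))), x = 0 := by
        intro x hx
        rcases List.mem_map.mp hx with ⟨j, hj, rfl⟩
        have h1 := pvCnt_mono S (hi j hj)
        have h2 := pvCnt_le_length S j
        omega
      rw [List.map_cons, List.sum_cons, List.sum_eq_zero hzero]
      omega
    · rw [if_neg hbr]
      have hle' : max start (pvCnt S i) ≤ (S.length : Int) := by omega
      rw [ih (max start (pvCnt S i)) _ hrest (by omega) hle']
      have hmax : ∀ j ∈ rest,
          max (max start (pvCnt S i)) (pvCnt S j) = max start (pvCnt S j) := by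
        intro j hj
        have := pvCnt_mono S (hi j hj)
        omega
      rw [List.map_congr_left (fun j hj => by rw [hmax j hj]) ]
      rw [List.map_cons, List.sum_cons]
      ring

-- countP over an erase: the erased element's contribution splits off
theorem pvCountP_erase (p : Int → Bool) (a : Int) :
    ∀ (L : List Int), a ∈ L →
      L.countP p = (L.erase a).countP p + (if p a then 1 else 0) := by
  intro L
  induction L with
  | nil => intro h; simp at h
  | cons x t ih =>
    intro h
    by_cases hx : x = a
    · subst hx
      rw [List.erase_cons_head, List.countP_cons]
    · have hmem : a ∈ t := by
        rcases List.mem_cons.mp h with h' | h'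
        · exact absurd h'.symm hx
        · exact h'
      rw [List.erase_cons_tail (by simpa using hx)]
      rw [List.countP_cons, List.countP_cons, ih hmem]
      split_ifs <;> omega

-- for nonempty L with minimum removed, counting "≥ e" matches A's per-end term
theorem pvCounted_eq (L : List Int) (m : Int)
    (hmem : m ∈ L) (hmin : ∀ y ∈ L, m ≤ y) (e : Int) :
    (((L.erase m).countP (fun s => decide (e ≤ s)) : Nat) : Int) =
      (L.length : Int) - max 1 (pvCnt L e) := by
  have hsplit := pvCountP_erase (fun s => decide (e ≤ s)) m L hmem
  have htot : L.countP (fun s => decide (e ≤ s)) + L.countP (fun s => decide (s < e)) = L.length := by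
    clear hsplit hmem hmin
    induction L with
    | nil => simp
    | cons x t iht =>
      rw [List.countP_cons, List.countP_cons]
      simp only [List.length_cons]
      split_ifs <;> simp_all <;> omega
  by_cases he : e ≤ m
  · have hcnt0 : pvCnt L e = 0 := by
      simp only [pvCnt, Nat.cast_eq_zero]
      apply List.countP_eq_zero.mpr
      intro s hs
      simp only [decide_eq_true_eq]
      have := hmin s hs; omega
    rw [hcnt0]
    rw [if_pos (by simpa using he)] at hsplit
    simp only [pvCnt] at *
    omega
  · have hcnt1 : 1 ≤ pvCnt L e := by
      simp only [pvCnt]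
      have : 0 < L.countP (fun s => decide (s < e)) :=
        List.countP_pos_iff.mpr ⟨m, hmem, by simp; omega⟩
      omega
    have hle := pvCnt_le_length L e
    rw [if_neg (by simpa using he)] at hsplit
    simp only [pvCnt] at *
    omega

-- B as a sum of A's per-end terms, over the segments in order
theorem solution_alt_eq (segments : List (Int × Int)) (hne : segments ≠ []) :
    solution_alt segments =
      (segments.map (fun p =>
        (segments.length : Int) - max 1 (pvCnt (segments.map (fun q => q.1)) p.2))).sum := by
  unfold solution_alt
  rw [if_neg hne]
  set L := segments.map (fun q => q.1) with hLdef
  have hLne : L ≠ [] := by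
    simp [hLdef, hne]
  rcases hm : PySem.List.min? L (fun x => x) with _ | m
  · exact absurd ((PySem.List.min?_eq_none_iff L (fun x => x)).mp hm) hLne
  · have hmem : m ∈ L := PySem.List.min?_mem hm
    have hmin : ∀ y ∈ L, m ≤ y := PySem.List.min?_isMin hm
    have hrem : PySem.List.remove? L m = some (L.erase m) :=
      PySem.List.remove?_eq_some_erase L m hmem
    simp only [hm, hrem, Option.getD_some]
    have hlen : (segments.length : Int) = (L.length : Int) := by simp [hLdef]
    rw [hlen]
    congr 1
    apply List.map_congr_left
    intro p _
    exact pvCounted_eq L m hmem hmin p.2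

-- ===== VERDICT (by name: the statement is the Claim_ definition above) =====
theorem solution_spec : Claim_equal_solution := by
  intro segments _
  unfold Spec_solution
  rcases hseg : segments with _ | ⟨p, t⟩
  · simp [solution, solution_alt, pvLoopA, PySem.List.sorted]
  · rw [← hseg]
    have hne : segments ≠ [] := by rw [hseg]; simp
    have hn1 : (1 : Int) ≤ (segments.length : Int) := by
      have : 0 < segments.length := List.length_pos_iff.mpr hne
      exact_mod_cast this
    set S := PySem.List.sorted (segments.map (fun p => p.1)) (fun x => x) false with hSdef
    set E := PySem.List.sorted (segments.map (fun p => p.2)) (fun x => x) false with hEdef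
    have hSlen : S.length = segments.length := by
      rw [hSdef, PySem.List.length_sorted, List.length_map]
    have hSsort : S.Pairwise (· ≤ ·) := PySem.List.sorted_pairwise _ _
    have hEsort : E.Pairwise (· ≤ ·) := PySem.List.sorted_pairwise _ _
    have hA : solution segments =
        (E.map (fun e => (S.length : Int) - max 1 (pvCnt S e))).sum := by
      unfold solution
      rw [← hSdef, ← hEdef, ← hSlen]
      rw [pvLoopA_eq S hSsort E 1 0 hEsort (by omega) (by rw [hSlen]; omega)]
      simp
    rw [hA, solution_alt_eq segments hne]
    -- countP over the sorted starts equals countP over the starts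
    have hScnt : ∀ e, pvCnt S e = pvCnt (segments.map (fun q => q.1)) e := by
      intro e
      simp only [pvCnt]
      congr 1
      exact (PySem.List.sorted_perm _ _ _).countP_eq _
    have hEperm : E.Perm (segments.map (fun q => q.2)) := PySem.List.sorted_perm _ _ _
    rw [hSlen]
    calc (E.map (fun e => ((segments.length : Int)) - max 1 (pvCnt S e))).sum
        = ((segments.map (fun q => q.2)).map
            (fun e => ((segments.length : Int)) - max 1 (pvCnt S e))).sum :=
          (hEperm.map _).sum_eq
      _ = (segments.map (fun p =>
            ((segments.length : Int)) - max 1 (pvCnt (segments.map (fun q => q.1)) p.2))).sum := by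
          rw [List.map_map]
          apply congrArg
          apply List.map_congr_left
          intro p _
          simp [hScnt]
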